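-- pv_equiv track=rewrite | github.com/hy299792458/LeetCode | python/672-bulbSwitcher.py | flipLights
-- ===== SOURCE A (Python) =====
-- def flipLights(n, m):
--     m1 = 0
--     m2 = 0
--     m3 = 0
--     m4 = 0
--     for i in range(n):
--         m1 *= 2
--         m2 *= 2
--         m3 *= 2
--         m4 *= 2
--         m1 += i % 2
--         m2 += (i + 1) % 2
--         if i % 3 == 0:
--             m3 += 1
--         m4 += 1
--     #print m1, m2, m3, m4
--     temp = set([m4])
--     for _ in range(m):
--         newTemp = set()
--         for l in temp:
--             newTemp.add(l ^ m1 & m4)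
--             newTemp.add(l ^ m2 & m4)
--             newTemp.add(l ^ m3 & m4)
--             newTemp.add(l ^ m4 & m4)
--         temp = newTemp
--     #print list(temp)
--     return len(temp)
-- ===== SOURCE B (Python) =====
-- def flipLights(n, m):
--     # The reachable-configuration count saturates: only min(n,3) bulbs and
--     # min(m,3) button presses matter, so a constant lookup table suffices.
--     n = max(0, min(n, 3))
--     m = max(0, min(m, 3))
--     return [[1, 1, 1, 1],
--             [1, 2, 2, 2],
--             [1, 3, 4, 4],
--             [1, 4, 7, 8]][n][m]
-- ===== Notes on version B (the rewrite author's own statement) =====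
-- stated objective: faster
-- what changed: Replaces the O(n)-bit mask construction and m rounds of BFS over XOR-reachable states by a constant-time lookup table on min(n,3) and min(m,3), after proving the state count saturates there.
import Mathlib
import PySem

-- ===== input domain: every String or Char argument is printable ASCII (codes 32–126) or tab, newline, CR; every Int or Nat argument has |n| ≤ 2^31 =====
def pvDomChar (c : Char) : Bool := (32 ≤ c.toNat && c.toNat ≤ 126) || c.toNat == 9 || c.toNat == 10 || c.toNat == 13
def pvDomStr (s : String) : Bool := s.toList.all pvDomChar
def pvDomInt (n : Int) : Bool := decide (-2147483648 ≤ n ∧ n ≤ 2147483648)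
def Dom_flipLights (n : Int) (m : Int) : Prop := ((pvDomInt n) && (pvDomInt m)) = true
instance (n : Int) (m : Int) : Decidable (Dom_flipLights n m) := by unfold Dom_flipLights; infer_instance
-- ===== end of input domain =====

-- B replaces A's O(n)-bit mask construction and m BFS rounds over XOR-reachable
-- states by a constant-time table lookup on min(n,3) and min(m,3) (objective: faster).

-- ===== PORT A =====
-- loop bodies of A, named so the proofs can speak about them
def flipLights_maskStep (s : Int × Int × Int × Int) (i : Int) : Int × Int × Int × Int :=
  (s.1 * 2 + PySem.Int.mod i 2,
   s.2.1 * 2 + PySem.Int.mod (i + 1) 2,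
   if PySem.Int.mod i 3 = 0 then s.2.2.1 * 2 + 1 else s.2.2.1 * 2,
   s.2.2.2 * 2 + 1)

def flipLights_inner (m1 m2 m3 m4 : Int) (nt : PySem.Set Int) (l : Int) : PySem.Set Int :=
  PySem.Set.add (PySem.Set.add (PySem.Set.add (PySem.Set.add nt
    (PySem.Int.bxor l (PySem.Int.band m1 m4)))
    (PySem.Int.bxor l (PySem.Int.band m2 m4)))
    (PySem.Int.bxor l (PySem.Int.band m3 m4)))
    (PySem.Int.bxor l (PySem.Int.band m4 m4))

def flipLights_step (m1 m2 m3 m4 : Int) (temp : PySem.Set Int) : PySem.Set Int :=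
  temp.foldl (flipLights_inner m1 m2 m3 m4) PySem.Set.empty

def flipLights (n : Int) (m : Int) : Int :=
  let ms := (PySem.List.pyRange 0 n 1).foldl flipLights_maskStep (0, 0, 0, 0)
  let temp : PySem.Set Int := PySem.Set.ofList [ms.2.2.2]
  let temp := (PySem.List.pyRange 0 m 1).foldl
    (fun t _ => flipLights_step ms.1 ms.2.1 ms.2.2.1 ms.2.2.2 t) temp
  PySem.Set.len temp

-- ===== PORT B =====
def flipLights_alt (n : Int) (m : Int) : Int :=
  let n' := max 0 (min n 3)
  let m' := max 0 (min m 3)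
  PySem.List.pyGetD
    (PySem.List.pyGetD ([[1, 1, 1, 1], [1, 2, 2, 2], [1, 3, 4, 4], [1, 4, 7, 8]] : List (List Int)) n' [])
    m' 0

-- ===== PRECONDITION & SPEC =====
def Spec_flipLights (n : Int) (m : Int) (out : Int) : Prop := out = flipLights_alt n m
instance (n : Int) (m : Int) (out : Int) : Decidable (Spec_flipLights n m out) := by unfold Spec_flipLights; infer_instance

-- ===== CLAIM (what is proved, stated in full; the proofs are below) =====
def Claim_equal_flipLights : Prop := ∀ (n : Int) (m : Int), Dom_flipLights n m → Spec_flipLights n m (flipLights n m)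

-- ===== LEMMAS AND PROOFS =====

-- generic fold/iterate glue
theorem pvFoldConst {α β : Type} (f : α → α) : ∀ (L : List β) (x : α),
    L.foldl (fun s _ => f s) x = f^[L.length] x := by
  intro L
  induction L with
  | nil => intro x; rfl
  | cons b L ih => intro x; simp [List.foldl, ih, Function.iterate_succ_apply]

theorem pvRangeEmpty (m : Int) (h : m ≤ 0) : PySem.List.pyRange 0 m 1 = [] := by
  simp [PySem.List.pyRange]
  omega

theorem pvRangeLen (m : Int) : (PySem.List.pyRange 0 m 1).length = m.toNat := by
  by_cases h : m ≤ 0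
  · rw [pvRangeEmpty m h]; simp; omega
  · have h : 0 < m := by omega
    obtain ⟨k, rfl⟩ : ∃ k : ℕ, m = (k : Int) := ⟨m.toNat, (Int.toNat_of_nonneg h.le).symm⟩
    rw [PySem.List.pyRange_zero_natCast]; simp

theorem pvPeriod2 {α : Type} (f : α → α) (y : α) (h : f (f y) = y) :
    ∀ j, f^[j] y = y ∨ f^[j] y = f y := by
  intro j
  induction j with
  | zero => left; rfl
  | succ j ih =>
    rcases ih with h1 | h1
    · right; rw [Function.iterate_succ_apply', h1]
    · left; rw [Function.iterate_succ_apply', h1, h]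

-- Nat-level mirror of A's mask loop
def pvMaskStep (s : ℕ × ℕ × ℕ × ℕ) (i : ℕ) : ℕ × ℕ × ℕ × ℕ :=
  (s.1 * 2 + i % 2,
   s.2.1 * 2 + (i + 1) % 2,
   if i % 3 = 0 then s.2.2.1 * 2 + 1 else s.2.2.1 * 2,
   s.2.2.2 * 2 + 1)

theorem pvXorSplit (K c c' r r' : ℕ) (h : r < 2 ^ K) (h' : r' < 2 ^ K) :
    (c * 2 ^ K + r) ^^^ (c' * 2 ^ K + r') = (c ^^^ c') * 2 ^ K + (r ^^^ r') := by
  apply Nat.eq_of_testBit_eq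
  intro j
  rw [Nat.testBit_xor, mul_comm c, mul_comm c', mul_comm (c ^^^ c'),
      Nat.testBit_two_pow_mul_add c h, Nat.testBit_two_pow_mul_add c' h',
      Nat.testBit_two_pow_mul_add (c ^^^ c') (Nat.xor_lt_two_pow h h')]
  split <;> simp [Nat.testBit_xor]

theorem pvFoldLin : ∀ (L : List ℕ) (s : ℕ × ℕ × ℕ × ℕ),
    L.foldl pvMaskStep s =
      (s.1 * 2 ^ L.length + (L.foldl pvMaskStep (0, 0, 0, 0)).1,
       s.2.1 * 2 ^ L.length + (L.foldl pvMaskStep (0, 0, 0, 0)).2.1,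
       s.2.2.1 * 2 ^ L.length + (L.foldl pvMaskStep (0, 0, 0, 0)).2.2.1,
       s.2.2.2 * 2 ^ L.length + (L.foldl pvMaskStep (0, 0, 0, 0)).2.2.2) := by
  intro L
  induction L with
  | nil => intro s; simp
  | cons i L ih =>
    intro s
    show L.foldl pvMaskStep (pvMaskStep s i) = _
    rw [ih (pvMaskStep s i)]
    conv_rhs => rw [show ((i :: L).foldl pvMaskStep (0,0,0,0)) = L.foldl pvMaskStep (pvMaskStep (0,0,0,0) i) from rfl, ih (pvMaskStep (0,0,0,0) i)]
    simp only [pvMaskStep, List.length_cons]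
    refine Prod.ext ?_ (Prod.ext ?_ (Prod.ext ?_ ?_)) <;> simp <;> (try split_ifs) <;> ring

theorem pvFoldBound : ∀ (L : List ℕ),
    (L.foldl pvMaskStep (0, 0, 0, 0)).1 < 2 ^ L.length ∧
    (L.foldl pvMaskStep (0, 0, 0, 0)).2.1 < 2 ^ L.length ∧
    (L.foldl pvMaskStep (0, 0, 0, 0)).2.2.1 < 2 ^ L.length ∧
    (L.foldl pvMaskStep (0, 0, 0, 0)).2.2.2 = 2 ^ L.length - 1 := by
  intro L
  induction L with
  | nil => simp
  | cons i L ih =>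
    rw [List.foldl_cons, pvFoldLin L (pvMaskStep (0,0,0,0) i)]
    have h2 : i % 2 ≤ 1 := by omega
    have h2' : (i + 1) % 2 ≤ 1 := by omega
    have hp : 0 < 2 ^ L.length := Nat.two_pow_pos _
    simp only [pvMaskStep, List.length_cons, pow_succ]
    obtain ⟨b1, b2, b3, b4⟩ := ih
    have hmul : ∀ b r : ℕ, b ≤ 1 → r < 2 ^ L.length → b * 2 ^ L.length + r < 2 ^ L.length * 2 := by
      intro b r hb hr
      have h1 : b * 2 ^ L.length ≤ 1 * 2 ^ L.length := Nat.mul_le_mul_right _ hb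
      omega
    refine ⟨?_, ?_, ?_, ?_⟩ <;> simp <;> (try split_ifs) <;>
      first
        | exact hmul _ _ h2 b1
        | exact hmul _ _ h2' b2
        | omega

theorem pvFoldRel : ∀ (L : List ℕ) (s : ℕ × ℕ × ℕ × ℕ), s.1 ^^^ s.2.1 = s.2.2.2 →
    (L.foldl pvMaskStep s).1 ^^^ (L.foldl pvMaskStep s).2.1 = (L.foldl pvMaskStep s).2.2.2 := by
  intro L
  induction L with
  | nil => intro s h; exact h
  | cons i L ih =>
    intro s h
    refine ih (pvMaskStep s i) ?_
    show (s.1 * 2 + i % 2) ^^^ (s.2.1 * 2 + (i + 1) % 2) = s.2.2.2 * 2 + 1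
    have e1 := pvXorSplit 1 s.1 s.2.1 (i % 2) ((i + 1) % 2) (by omega) (by omega)
    norm_num at e1
    rw [e1, h]
    rcases Nat.mod_two_eq_zero_or_one i with h2 | h2 <;>
      [rw [h2, show (i + 1) % 2 = 1 by omega]; rw [h2, show (i + 1) % 2 = 0 by omega]] <;> rfl

-- the abstract coefficient map: which of m1,m2,m3 have been XORed onto m4
def pvPsi (q : ℕ × ℕ × ℕ × ℕ) (v : Bool × Bool × Bool) : ℕ :=
  ((q.2.2.2 ^^^ (if v.1 then q.1 else 0)) ^^^ (if v.2.1 then q.2.1 else 0)) ^^^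
    (if v.2.2 then q.2.2.1 else 0)

theorem pvPsiX1 (q : ℕ × ℕ × ℕ × ℕ) (v : Bool × Bool × Bool) :
    pvPsi q v ^^^ q.1 = pvPsi q (!v.1, v.2.1, v.2.2) := by
  obtain ⟨a, b, c⟩ := v
  cases a <;> simp [pvPsi, Nat.xor_assoc, Nat.xor_comm, Nat.xor_left_comm]

theorem pvPsiX2 (q : ℕ × ℕ × ℕ × ℕ) (v : Bool × Bool × Bool) :
    pvPsi q v ^^^ q.2.1 = pvPsi q (v.1, !v.2.1, v.2.2) := by
  obtain ⟨a, b, c⟩ := v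
  cases b <;> simp [pvPsi, Nat.xor_assoc, Nat.xor_comm, Nat.xor_left_comm]

theorem pvPsiX3 (q : ℕ × ℕ × ℕ × ℕ) (v : Bool × Bool × Bool) :
    pvPsi q v ^^^ q.2.2.1 = pvPsi q (v.1, v.2.1, !v.2.2) := by
  obtain ⟨a, b, c⟩ := v
  cases c <;> simp [pvPsi, Nat.xor_assoc, Nat.xor_comm, Nat.xor_left_comm]

theorem pvPsiX4 (q : ℕ × ℕ × ℕ × ℕ) (h12 : q.1 ^^^ q.2.1 = q.2.2.2) (v : Bool × Bool × Bool) :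
    pvPsi q v ^^^ q.2.2.2 = pvPsi q (!v.1, !v.2.1, v.2.2) := by
  obtain ⟨a, b, c⟩ := v
  rw [← h12]
  cases a <;> cases b <;> simp [pvPsi, Nat.xor_assoc, Nat.xor_comm, Nat.xor_left_comm]

theorem pvPsiSplit (K : ℕ) (c r : ℕ × ℕ × ℕ × ℕ)
    (h1 : r.1 < 2 ^ K) (h2 : r.2.1 < 2 ^ K) (h3 : r.2.2.1 < 2 ^ K) (h4 : r.2.2.2 < 2 ^ K)
    (v : Bool × Bool × Bool) :
    pvPsi (c.1 * 2 ^ K + r.1, c.2.1 * 2 ^ K + r.2.1, c.2.2.1 * 2 ^ K + r.2.2.1,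
           c.2.2.2 * 2 ^ K + r.2.2.2) v = (pvPsi c v) * 2 ^ K + pvPsi r v := by
  have hp : 0 < 2 ^ K := Nat.two_pow_pos _
  have hb : ∀ (b : Bool) (x y : ℕ), (if b then x * 2 ^ K + y else 0) =
      (if b then x else 0) * 2 ^ K + (if b then y else 0) := by
    intro b x y; cases b <;> simp
  have hlt : ∀ (b : Bool) (y : ℕ), y < 2 ^ K → (if b then y else 0) < 2 ^ K := by
    intro b y hy
    cases b
    · simpa using Nat.two_pow_pos K
    · simpa using hy
  simp only [pvPsi]
  rw [hb, hb, hb,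
      pvXorSplit K c.2.2.2 _ r.2.2.2 _ h4 (hlt _ _ h1),
      pvXorSplit K _ _ _ _ (Nat.xor_lt_two_pow h4 (hlt _ _ h1)) (hlt _ _ h2),
      pvXorSplit K _ _ _ _ (Nat.xor_lt_two_pow (Nat.xor_lt_two_pow h4 (hlt _ _ h1)) (hlt _ _ h2)) (hlt _ _ h3)]

theorem pvPsiBound (K : ℕ) (r : ℕ × ℕ × ℕ × ℕ)
    (h1 : r.1 < 2 ^ K) (h2 : r.2.1 < 2 ^ K) (h3 : r.2.2.1 < 2 ^ K) (h4 : r.2.2.2 < 2 ^ K)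
    (v : Bool × Bool × Bool) : pvPsi r v < 2 ^ K := by
  have hlt : ∀ (b : Bool) (y : ℕ), y < 2 ^ K → (if b then y else 0) < 2 ^ K := by
    intro b y hy
    cases b
    · simpa using Nat.two_pow_pos K
    · simpa using hy
  exact Nat.xor_lt_two_pow (Nat.xor_lt_two_pow (Nat.xor_lt_two_pow h4 (hlt _ _ h1)) (hlt _ _ h2)) (hlt _ _ h3)

theorem pvCInj : Function.Injective (pvPsi (2, 5, 4, 7)) := by decide

theorem pvPsiInj (K : ℕ) (r : ℕ × ℕ × ℕ × ℕ)
    (h1 : r.1 < 2 ^ K) (h2 : r.2.1 < 2 ^ K) (h3 : r.2.2.1 < 2 ^ K) (h4 : r.2.2.2 < 2 ^ K) :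
    Function.Injective (pvPsi (2 * 2 ^ K + r.1, 5 * 2 ^ K + r.2.1, 4 * 2 ^ K + r.2.2.1,
                               7 * 2 ^ K + r.2.2.2)) := by
  intro v w h
  have hs := pvPsiSplit K (2, 5, 4, 7) r h1 h2 h3 h4
  rw [hs v, hs w] at h
  have hp : 0 < 2 ^ K := Nat.two_pow_pos _
  have hv := pvPsiBound K r h1 h2 h3 h4 v
  have hw := pvPsiBound K r h1 h2 h3 h4 w
  have hC : pvPsi (2, 5, 4, 7) v = pvPsi (2, 5, 4, 7) w := by
    have e1 := congrArg (· / 2 ^ K) h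
    simpa [mul_comm, Nat.mul_add_div hp, Nat.div_eq_of_lt hv, Nat.div_eq_of_lt hw] using e1
  exact pvCInj hC

-- bridging the Int mask loop to the Nat one
theorem pvMaskCast : ∀ (L : List ℕ) (s : ℕ × ℕ × ℕ × ℕ),
    (L.map Int.ofNat).foldl flipLights_maskStep
        ((s.1 : Int), (s.2.1 : Int), (s.2.2.1 : Int), (s.2.2.2 : Int)) =
      (((L.foldl pvMaskStep s).1 : Int), ((L.foldl pvMaskStep s).2.1 : Int),
       ((L.foldl pvMaskStep s).2.2.1 : Int), ((L.foldl pvMaskStep s).2.2.2 : Int)) := by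
  intro L
  induction L with
  | nil => intro s; rfl
  | cons i L ih =>
    intro s
    rw [List.map_cons, List.foldl_cons]
    have hstep : flipLights_maskStep ((s.1 : Int), (s.2.1 : Int), (s.2.2.1 : Int), (s.2.2.2 : Int)) (i : Int) =
        (((pvMaskStep s i).1 : Int), ((pvMaskStep s i).2.1 : Int),
         ((pvMaskStep s i).2.2.1 : Int), ((pvMaskStep s i).2.2.2 : Int)) := by
      have hm2 : PySem.Int.mod (i : Int) 2 = ((i % 2 : ℕ) : Int) := by
        exact_mod_cast PySem.Int.mod_natCast i 2
      have hm2' : PySem.Int.mod ((i : Int) + 1) 2 = (((i + 1) % 2 : ℕ) : Int) := by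
        have := PySem.Int.mod_natCast (i + 1) 2
        push_cast at this ⊢
        exact_mod_cast this
      have hm3 : PySem.Int.mod (i : Int) 3 = ((i % 3 : ℕ) : Int) := by
        exact_mod_cast PySem.Int.mod_natCast i 3
      simp only [flipLights_maskStep, pvMaskStep, hm2, hm2', hm3]
      have hc : ((i % 3 : ℕ) : Int) = 0 ↔ i % 3 = 0 := by exact_mod_cast Nat.cast_eq_zero
      split_ifs with h1 h2 h2 <;> [skip; exact absurd (hc.mp h1) h2; exact absurd (hc.mpr h2) h1; skip] <;>
        push_cast <;> ring_nf
    rw [show (Int.ofNat i : Int) = ((i : ℕ) : Int) from rfl, hstep, ih (pvMaskStep s i)]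
    rfl

-- Set-level transport along an injective map
theorem pvAddMapEq {α β : Type} [BEq α] [LawfulBEq α] [BEq β] [LawfulBEq β]
    (f : α → β) (hf : Function.Injective f) (S : List α) (x : α) :
    PySem.Set.add (S.map f) (f x) = (PySem.Set.add S x).map f := by
  by_cases hx : x ∈ S <;>
    simp [PySem.Set.add, PySem.Set.contains, List.contains_eq_mem, hx,
          List.mem_map_of_injective hf]

-- abstract BFS over coefficient vectors, mirroring A's inner loop
def pvAbsInner (nt : PySem.Set (Bool × Bool × Bool)) (v : Bool × Bool × Bool) :
    PySem.Set (Bool × Bool × Bool) :=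
  PySem.Set.add (PySem.Set.add (PySem.Set.add (PySem.Set.add nt
    (!v.1, v.2.1, v.2.2)) (v.1, !v.2.1, v.2.2)) (v.1, v.2.1, !v.2.2)) (!v.1, !v.2.1, v.2.2)

def pvAbsStep (S : PySem.Set (Bool × Bool × Bool)) : PySem.Set (Bool × Bool × Bool) :=
  S.foldl pvAbsInner PySem.Set.empty

theorem pvInnerMap (q : ℕ × ℕ × ℕ × ℕ) (h12 : q.1 ^^^ q.2.1 = q.2.2.2)
    (hb1 : q.1 &&& q.2.2.2 = q.1) (hb2 : q.2.1 &&& q.2.2.2 = q.2.1)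
    (hb3 : q.2.2.1 &&& q.2.2.2 = q.2.2.1)
    (hf : Function.Injective (fun v => ((pvPsi q v : ℕ) : Int))) :
    ∀ (V NT : List (Bool × Bool × Bool)),
      (V.map (fun v => ((pvPsi q v : ℕ) : Int))).foldl
          (flipLights_inner (q.1 : Int) (q.2.1 : Int) (q.2.2.1 : Int) (q.2.2.2 : Int))
          (NT.map (fun v => ((pvPsi q v : ℕ) : Int)))
        = (V.foldl pvAbsInner NT).map (fun v => ((pvPsi q v : ℕ) : Int)) := by
  intro V
  induction V with
  | nil => intro NT; rfl
  | cons v V ih =>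
    intro NT
    show (V.map _).foldl _ (flipLights_inner _ _ _ _ (NT.map _) ((fun v => ((pvPsi q v : ℕ) : Int)) v)) = _
    have hone : flipLights_inner (q.1 : Int) (q.2.1 : Int) (q.2.2.1 : Int) (q.2.2.2 : Int)
        (NT.map (fun v => ((pvPsi q v : ℕ) : Int))) ((pvPsi q v : ℕ) : Int)
        = (pvAbsInner NT v).map (fun v => ((pvPsi q v : ℕ) : Int)) := by
      simp only [flipLights_inner, pvAbsInner, PySem.Int.band_natCast, PySem.Int.bxor_natCast,
        hb1, hb2, hb3, Nat.and_self, pvPsiX1 q v, pvPsiX2 q, pvPsiX3 q, pvPsiX4 q h12]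
      rw [show ((pvPsi q (!v.1, v.2.1, v.2.2) : ℕ) : Int) = (fun v => ((pvPsi q v : ℕ) : Int)) (!v.1, v.2.1, v.2.2) from rfl,
          pvAddMapEq _ hf,
          show ((pvPsi q (v.1, !v.2.1, v.2.2) : ℕ) : Int) = (fun v => ((pvPsi q v : ℕ) : Int)) (v.1, !v.2.1, v.2.2) from rfl,
          pvAddMapEq _ hf,
          show ((pvPsi q (v.1, v.2.1, !v.2.2) : ℕ) : Int) = (fun v => ((pvPsi q v : ℕ) : Int)) (v.1, v.2.1, !v.2.2) from rfl,
          pvAddMapEq _ hf,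
          show ((pvPsi q (!v.1, !v.2.1, v.2.2) : ℕ) : Int) = (fun v => ((pvPsi q v : ℕ) : Int)) (!v.1, !v.2.1, v.2.2) from rfl,
          pvAddMapEq _ hf]
    rw [hone]
    exact ih (pvAbsInner NT v)

theorem pvStepMap (q : ℕ × ℕ × ℕ × ℕ) (h12 : q.1 ^^^ q.2.1 = q.2.2.2)
    (hb1 : q.1 &&& q.2.2.2 = q.1) (hb2 : q.2.1 &&& q.2.2.2 = q.2.1)
    (hb3 : q.2.2.1 &&& q.2.2.2 = q.2.2.1)
    (hf : Function.Injective (fun v => ((pvPsi q v : ℕ) : Int))) (j : ℕ)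
    (V : List (Bool × Bool × Bool)) :
    (flipLights_step (q.1 : Int) (q.2.1 : Int) (q.2.2.1 : Int) (q.2.2.2 : Int))^[j]
        (V.map (fun v => ((pvPsi q v : ℕ) : Int)))
      = (pvAbsStep^[j] V).map (fun v => ((pvPsi q v : ℕ) : Int)) := by
  induction j generalizing V with
  | zero => rfl
  | succ j ih =>
    rw [Function.iterate_succ_apply, Function.iterate_succ_apply]
    rw [show flipLights_step (q.1 : Int) (q.2.1 : Int) (q.2.2.1 : Int) (q.2.2.2 : Int)
          (V.map (fun v => ((pvPsi q v : ℕ) : Int)))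
        = (pvAbsStep V).map (fun v => ((pvPsi q v : ℕ) : Int)) from by
      have := pvInnerMap q h12 hb1 hb2 hb3 hf V []
      simpa [flipLights_step, pvAbsStep, PySem.Set.empty] using this]
    exact ih (pvAbsStep V)

-- A's mask loop result, named for the proofs
def pvMasks (n : Int) : Int × Int × Int × Int :=
  (PySem.List.pyRange 0 n 1).foldl flipLights_maskStep (0, 0, 0, 0)

theorem pvAEval (n m : Int) :
    flipLights n m =
      ((((flipLights_step (pvMasks n).1 (pvMasks n).2.1 (pvMasks n).2.2.1
          (pvMasks n).2.2.2)^[m.toNat] [(pvMasks n).2.2.2]).length : ℕ) : ℤ) := by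
  simp only [flipLights, pvMasks]
  rw [pvFoldConst (flipLights_step _ _ _ _) (PySem.List.pyRange 0 m 1), pvRangeLen]
  rfl

theorem pvMain (n m : Int) : flipLights n m = flipLights_alt n m := by
  rw [pvAEval]
  by_cases hn0 : n ≤ 0
  · -- n ≤ 0 : no bulbs, the state set stays {0}
    rw [show pvMasks n = (0, 0, 0, 0) from by unfold pvMasks; rw [pvRangeEmpty n hn0]; rfl]
    have hfix : flipLights_step 0 0 0 0 [(0 : Int)] = [0] := by decide
    have hall : ∀ j, (flipLights_step 0 0 0 0)^[j] [(0 : Int)] = [0] := by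
      intro j; exact Function.iterate_fixed hfix j
    rw [show ((0,0,0,0) : Int × Int × Int × Int).1 = 0 from rfl]
    rw [hall]
    simp only [flipLights_alt]
    rw [show max 0 (min n 3) = 0 by omega]
    rcases show max 0 (min m 3) = 0 ∨ max 0 (min m 3) = 1 ∨ max 0 (min m 3) = 2 ∨
        max 0 (min m 3) = 3 by omega with h | h | h | h <;> rw [h] <;> decide
  · have hn0 : 0 < n := by omega
    rcases show n = 1 ∨ n = 2 ∨ 3 ≤ n by omega with hn | hn | hn
    · -- n = 1
      subst hn
      rw [show pvMasks 1 = (0, 1, 1, 1) from by decide]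
      simp only [flipLights_alt]
      rw [show max 0 (min (1:Int) 3) = 1 by omega]
      cases hmm : m.toNat with
      | zero =>
        rw [show max 0 (min m 3) = 0 by omega]
        decide
      | succ j =>
        rw [Function.iterate_succ_apply,
            Function.iterate_fixed (show flipLights_step 0 1 1 1 (flipLights_step 0 1 1 1 [(1:Int)]) = flipLights_step 0 1 1 1 [(1:Int)] by decide) j]
        rcases show max 0 (min m 3) = 1 ∨ max 0 (min m 3) = 2 ∨ max 0 (min m 3) = 3 by omega
          with h | h | h <;> rw [h] <;> decide
    · -- n = 2
      subst hn
      rw [show pvMasks 2 = (1, 2, 2, 3) from by decide]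
      simp only [flipLights_alt]
      rw [show max 0 (min (2:Int) 3) = 2 by omega]
      rcases show m.toNat = 0 ∨ m.toNat = 1 ∨ 2 ≤ m.toNat by omega with hmm | hmm | hmm2
      · rw [hmm, show max 0 (min m 3) = 0 by omega]; decide
      · rw [hmm, show max 0 (min m 3) = 1 by omega]; decide
      · obtain ⟨j, hmm⟩ : ∃ j, m.toNat = j + 2 := ⟨m.toNat - 2, by omega⟩
        rw [hmm, Function.iterate_add_apply _ j 2]
        rcases pvPeriod2 (flipLights_step 1 2 2 3) ((flipLights_step 1 2 2 3)^[2] [(3:Int)])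
            (by decide) j with hp | hp <;> rw [hp] <;>
          rcases show max 0 (min m 3) = 2 ∨ max 0 (min m 3) = 3 by omega with h | h <;>
            rw [h] <;> decide
    · -- n ≥ 3 : transport to the abstract coefficient BFS
      have hnn : n = ((n.toNat : ℕ) : Int) := by omega
      obtain ⟨k, hk⟩ : ∃ k, n.toNat = 3 + k := ⟨n.toNat - 3, by omega⟩
      set N := (List.range n.toNat).foldl pvMaskStep (0, 0, 0, 0) with hN
      have hrange : PySem.List.pyRange 0 n 1 = (List.range n.toNat).map Int.ofNat := by
        rw [hnn, PySem.List.pyRange_zero_natCast]; rfl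
      have hcast : pvMasks n = ((N.1 : Int), (N.2.1 : Int), (N.2.2.1 : Int), (N.2.2.2 : Int)) := by
        unfold pvMasks
        rw [hrange]
        exact pvMaskCast (List.range n.toNat) (0, 0, 0, 0)
      set R := (((List.range k).map (fun x => 3 + x)).foldl pvMaskStep (0, 0, 0, 0)) with hR
      have hsplit : N = (2 * 2 ^ k + R.1, 5 * 2 ^ k + R.2.1, 4 * 2 ^ k + R.2.2.1,
          7 * 2 ^ k + R.2.2.2) := by
        rw [hN, hk, List.range_add, List.foldl_append,
            show (List.range 3).foldl pvMaskStep (0, 0, 0, 0) = (2, 5, 4, 7) from by decide,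
            pvFoldLin (((List.range k).map (fun x => 3 + x))) (2, 5, 4, 7), ← hR]
        simp
      have hbb := pvFoldBound ((List.range k).map (fun x => 3 + x))
      rw [← hR] at hbb
      simp only [List.length_map, List.length_range] at hbb
      obtain ⟨b1, b2, b3, b4⟩ := hbb
      have hkpos : 0 < 2 ^ k := Nat.two_pow_pos k
      have b4' : R.2.2.2 < 2 ^ k := by omega
      have hrel : N.1 ^^^ N.2.1 = N.2.2.2 := pvFoldRel (List.range n.toNat) (0, 0, 0, 0) rfl
      have hm4 : N.2.2.2 = 2 ^ (k + 3) - 1 := by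
        rw [hsplit]
        have h8 : 2 ^ (k + 3) = 8 * 2 ^ k := by rw [pow_add]; ring
        simp only []
        omega
      have habs : ∀ x : ℕ, x < 2 ^ (k + 3) → x &&& N.2.2.2 = x := by
        intro x hx
        rw [hm4, Nat.and_two_pow_sub_one_eq_mod, Nat.mod_eq_of_lt hx]
      have h8 : 2 ^ (k + 3) = 8 * 2 ^ k := by rw [pow_add]; ring
      have hb1 : N.1 &&& N.2.2.2 = N.1 := habs _ (by rw [hsplit]; simp only []; omega)
      have hb2 : N.2.1 &&& N.2.2.2 = N.2.1 := habs _ (by rw [hsplit]; simp only []; omega)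
      have hb3 : N.2.2.1 &&& N.2.2.2 = N.2.2.1 := habs _ (by rw [hsplit]; simp only []; omega)
      have hinj : Function.Injective (pvPsi N) := by
        rw [hsplit]; exact pvPsiInj k R b1 b2 b3 b4'
      have hinjI : Function.Injective (fun v => ((pvPsi N v : ℕ) : Int)) := by
        intro v w h
        exact hinj (by exact_mod_cast (show ((pvPsi N v : ℕ) : Int) = ((pvPsi N w : ℕ) : Int) from h))
      have hc1 : (pvMasks n).1 = (N.1 : Int) := by rw [hcast]
      have hc2 : (pvMasks n).2.1 = (N.2.1 : Int) := by rw [hcast]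
      have hc3 : (pvMasks n).2.2.1 = (N.2.2.1 : Int) := by rw [hcast]
      have hc4 : (pvMasks n).2.2.2 = (N.2.2.2 : Int) := by rw [hcast]
      have hstart : [(N.2.2.2 : Int)] =
          ([((false, false, false) : Bool × Bool × Bool)]).map
            (fun v => ((pvPsi N v : ℕ) : Int)) := by
        simp [pvPsi]
      rw [hc1, hc2, hc3, hc4, hstart, pvStepMap N hrel hb1 hb2 hb3 hinjI m.toNat, List.length_map]
      simp only [flipLights_alt]
      rw [show max 0 (min n 3) = 3 by omega]
      rcases show m.toNat = 0 ∨ m.toNat = 1 ∨ m.toNat = 2 ∨ 3 ≤ m.toNat by omega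
        with hmm | hmm | hmm | hmm2
      · rw [hmm, show max 0 (min m 3) = 0 by omega]; decide
      · rw [hmm, show max 0 (min m 3) = 1 by omega]; decide
      · rw [hmm, show max 0 (min m 3) = 2 by omega]; decide
      · obtain ⟨j, hmm⟩ : ∃ j, m.toNat = j + 3 := ⟨m.toNat - 3, by omega⟩
        rw [hmm, Function.iterate_add_apply _ j 3, show max 0 (min m 3) = 3 by omega]
        rcases pvPeriod2 pvAbsStep (pvAbsStep^[3] [((false, false, false) : Bool × Bool × Bool)])
            (by decide) j with hp | hp <;> rw [hp] <;> decide

-- ===== VERDICT (by name: the statement is the Claim_ definition above) =====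
theorem flipLights_spec : Claim_equal_flipLights := by
  intro n m _
  unfold Spec_flipLights
  exact pvMain n m
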